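-- pv_equiv track=rewrite | github.com/Cloud-IV/CS100-Programs | HW19b_AbrarRouf.py | vowelFrequency
-- ===== SOURCE A (Python) =====
-- def countVowels(s):
--     vowels = 'aeiou'
--     vowel_counter = 0
--     lowercase_s = s.lower()
--     for character in lowercase_s:
--         if character in vowels:
--             vowel_counter += 1
--     return vowel_counter
--
-- def vowelFrequency(t):
--     vowel_dict = {}
--     words = t.split()
--     for word in words:
--         if countVowels(word) not in vowel_dict.keys():
--             vowel_dict[countVowels(word)] = [word]
--         elif countVowels(word) in vowel_dict.keys():
--                 vowel_dict[countVowels(word)] += [word]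
--     return vowel_dict
-- ===== SOURCE B (Python) =====
-- def vowelFrequency(t):
--     words = t.split()
--     pairs = [(sum(ch in 'aeiou' for ch in w.lower()), w) for w in words]
--     return {c: [w for k, w in pairs if k == c]
--             for c in dict.fromkeys(k for k, _ in pairs)}
-- ===== Notes on version B (the rewrite author's own statement) =====
-- stated objective: alternative
-- what changed: A builds the dict in one pass, mutating an entry per word with three vowel-count recomputations each; B computes each word's count once into (count, word) pairs, dedups the counts in first-occurrence order, and builds each group by filtering the pairs per key.
import Mathlib
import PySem

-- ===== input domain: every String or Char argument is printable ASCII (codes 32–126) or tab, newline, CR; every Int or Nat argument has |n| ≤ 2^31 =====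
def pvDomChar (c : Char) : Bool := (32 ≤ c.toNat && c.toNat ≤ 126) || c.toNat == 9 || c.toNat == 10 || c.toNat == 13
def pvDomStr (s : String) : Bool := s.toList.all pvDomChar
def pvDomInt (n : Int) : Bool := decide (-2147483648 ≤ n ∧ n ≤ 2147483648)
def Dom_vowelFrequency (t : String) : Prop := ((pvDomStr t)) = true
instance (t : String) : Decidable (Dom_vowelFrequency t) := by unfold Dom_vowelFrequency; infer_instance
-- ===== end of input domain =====

-- B groups words by computing each vowel count once into pairs and filtering per deduped key,
-- instead of A's one-pass dict mutation with repeated recounts; alternative decomposition, not faster.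

-- ===== PORT A =====
def countVowelsA (s : String) : Int :=
  (PySem.Chars.lower s.toList).foldl
    (fun acc c => if PySem.Chars.isIn [c] "aeiou".toList then acc + 1 else acc) 0

def vowelFrequency (t : String) : List (Int × List String) :=
  let words := PySem.Str.split₀ t
  (words.foldl (fun d w =>
      if ¬ (d.contains (countVowelsA w)) then d.insert (countVowelsA w) [w]
      else if d.contains (countVowelsA w) then
        d.insert (countVowelsA w) (d.getD (countVowelsA w) [] ++ [w])
      else d)
    PySem.Dict.empty).items

-- ===== PORT B =====
def countVowelsB (s : String) : Int :=
  ((PySem.Chars.lower s.toList).map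
    (fun c => if PySem.Chars.isIn [c] "aeiou".toList then (1 : Int) else 0)).sum

def vowelFrequency_alt (t : String) : List (Int × List String) :=
  let words := PySem.Str.split₀ t
  let pairs := words.map (fun w => (countVowelsB w, w))
  (PySem.List.dedup (pairs.map (·.1))).map
    (fun c => (c, (pairs.filter (fun p => p.1 == c)).map (·.2)))

-- ===== PRECONDITION & SPEC =====
def Spec_vowelFrequency (t : String) (out : List (Int × List String)) : Prop := out = vowelFrequency_alt t
instance (t : String) (out : List (Int × List String)) : Decidable (Spec_vowelFrequency t out) := by unfold Spec_vowelFrequency; infer_instance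

-- ===== CLAIM (what is proved, stated in full; the proofs are below) =====
def Claim_equal_vowelFrequency : Prop := ∀ (t : String), Dom_vowelFrequency t → Spec_vowelFrequency t (vowelFrequency t)

-- ===== LEMMAS AND PROOFS =====

-- the two vowel counters agree: both are the count of vowel characters
theorem countVowels_eq (s : String) : countVowelsA s = countVowelsB s := by
  unfold countVowelsA countVowelsB
  rw [PySem.List.foldl_count_if, PySem.List.sum_map_ite_one_zero]
  simp

-- A's loop body is exactly Dict.modify with default [] and append
theorem stepA_eq_modify (d : PySem.Dict Int (List String)) (w : String) :
    (if ¬ (d.contains (countVowelsA w)) then d.insert (countVowelsA w) [w]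
     else if d.contains (countVowelsA w) then
       d.insert (countVowelsA w) (d.getD (countVowelsA w) [] ++ [w])
     else d)
    = d.modify (countVowelsA w) [] (fun x => x ++ [w]) := by
  unfold PySem.Dict.modify
  split_ifs with h1
  · rfl
  · -- key absent: getD is the default []
    have hn : d.get? (countVowelsA w) = none := by
      unfold PySem.Dict.get?
      cases hf : d.items.find? (fun p => p.1 == countVowelsA w) with
      | none => rfl
      | some p =>
        exact absurd (List.any_eq_true.mpr
          ⟨p, List.mem_of_find?_eq_some hf, List.find?_some hf⟩) h1
    simp [PySem.Dict.getD, hn]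

-- ===== VERDICT (by name: the statement is the Claim_ definition above) =====

theorem vowelFrequency_spec : Claim_equal_vowelFrequency := by
  intro t _
  unfold Spec_vowelFrequency vowelFrequency vowelFrequency_alt
  set words := PySem.Str.split₀ t with hw
  -- replace A's loop body by modify
  have hbody : ∀ (d : PySem.Dict Int (List String)) (w : String),
      (if ¬ (d.contains (countVowelsA w)) then d.insert (countVowelsA w) [w]
       else if d.contains (countVowelsA w) then
         d.insert (countVowelsA w) (d.getD (countVowelsA w) [] ++ [w])
       else d)
      = d.modify (countVowelsA w) [] (fun x => x ++ [w]) := stepA_eq_modify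
  simp only [hbody]
  have hnd : (words.foldl (fun d w => d.modify (countVowelsA w) [] (fun x => x ++ [w]))
      PySem.Dict.empty).keys.Nodup := by
    exact PySem.Dict.nodup_keys_foldl_modify_key words countVowelsA []
      (fun _ w _ => _ ++ [w]) PySem.Dict.empty (by simp [PySem.Dict.empty, PySem.Dict.keys])
  rw [PySem.Dict.items_eq_map_keys _ hnd []]
  rw [PySem.Dict.keys_foldl_modify_key words countVowelsA [] (fun _ w x => x ++ [w])]
  have hkeys : PySem.Set.update (PySem.Dict.empty (κ := Int) (ν := List String)).keys
      (words.map countVowelsA)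
      = PySem.List.dedup ((words.map (fun w => (countVowelsB w, w))).map (·.1)) := by
    simp [PySem.Set.update, PySem.List.dedup, PySem.Set.ofList, PySem.Set.empty,
      PySem.Dict.empty, PySem.Dict.keys, List.map_map]
    congr 1
    exact List.map_congr_left (fun w _ => countVowels_eq w)
  rw [hkeys]
  apply List.map_congr_left
  intro c _
  simp only [Prod.mk.injEq, true_and]
  -- the loop over words is the pairs loop of getD_foldl_modify_append
  ·
    have hfold : words.foldl (fun d w => d.modify (countVowelsA w) [] (fun x => x ++ [w]))
        PySem.Dict.empty
        = (words.map (fun w => (countVowelsA w, w))).foldl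
            (fun d p => d.modify p.1 [] (fun x => x ++ [p.2])) PySem.Dict.empty := by
      rw [List.foldl_map]
    rw [hfold, PySem.Dict.getD_foldl_modify_append]
    have hpairs : words.map (fun w => (countVowelsA w, w))
        = words.map (fun w => (countVowelsB w, w)) :=
      List.map_congr_left (fun w _ => by rw [countVowels_eq])
    rw [hpairs]
    simp [PySem.Dict.empty, PySem.Dict.getD, PySem.Dict.get?]
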